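-- pv_equiv track=rewrite | github.com/gdecarpentier/DIYRE01_UsingTheWS2811ForControllingLights | ws2811_python/ws2811_python.py | get_stream_from_bytes
-- ===== SOURCE A (Python) =====
-- def get_stream_from_bytes(bytes):
-- 	data = []
-- 	num_triplets = int(len(bytes) / 3)
-- 	for i in range(num_triplets):
--
-- 		# Get the next 3 bytes representing X, Y and Z, respectively. And XYZ could be RGB, GRB, BRG, etc.
-- 		x = bytes[3 * i + 0]
-- 		y = bytes[3 * i + 1]
-- 		z = bytes[3 * i + 2]
--
-- 		# Pack the three bytes as four 6-bit values, leaving bit 6 and 7 for message control.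
-- 		message_end = 1 if i == num_triplets - 1 else 0		# 1 if this is the very last triplet to send. 0 otherwise.
-- 		data.append((x >> 2) & 0x3f)						# Packed byte 0: '00xxxxxx', MSB first
-- 		data.append(((x & 0x03) << 4) | ((y >> 4) & 0x0f))	# Packed byte 1: '00xxyyyy', MSB first,
-- 		data.append(((y & 0x0f) << 2) | ((z >> 6) & 0x03))	# Packed byte 2: '00yyyyzz', MSB first.
-- 		data.append((z & 0x3f) | (message_end << 7))		# Packed byte 3: 'e0zzzzzz', MSB first, e being 'message_end'
--
-- 	return data
-- ===== SOURCE B (Python) =====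
-- def get_stream_from_bytes(bytes):
-- 	# Stage 1: expand the usable triplets into one flat MSB-first bit list.
-- 	bits = []
-- 	for b in bytes[:len(bytes) - len(bytes) % 3]:
-- 		bits.extend((b >> k) & 1 for k in range(7, -1, -1))
-- 	# Stage 2: regroup the bit stream into 6-bit packed bytes.
-- 	data = []
-- 	for j in range(0, len(bits), 6):
-- 		value = 0
-- 		for bit in bits[j:j + 6]:
-- 			value = value * 2 + bit
-- 		data.append(value)
-- 	# Stage 3: flag the last packed byte of the stream as the message end.
-- 	if data:
-- 		data[-1] |= 0x80
-- 	return data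
-- ===== Notes on version B (the rewrite author's own statement) =====
-- stated objective: alternative
-- what changed: B replaces A's single loop over triplets with three staged passes over a different intermediate data structure: it first expands the usable bytes into a flat MSB-first bit list, then regroups that bit stream into 6-bit packed bytes, and finally ORs 0x80 into the stream's last byte, where A computes each packed byte with per-triplet cross-byte mask/shift expressions and a per-iteration last-triplet flag.
import Mathlib
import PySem

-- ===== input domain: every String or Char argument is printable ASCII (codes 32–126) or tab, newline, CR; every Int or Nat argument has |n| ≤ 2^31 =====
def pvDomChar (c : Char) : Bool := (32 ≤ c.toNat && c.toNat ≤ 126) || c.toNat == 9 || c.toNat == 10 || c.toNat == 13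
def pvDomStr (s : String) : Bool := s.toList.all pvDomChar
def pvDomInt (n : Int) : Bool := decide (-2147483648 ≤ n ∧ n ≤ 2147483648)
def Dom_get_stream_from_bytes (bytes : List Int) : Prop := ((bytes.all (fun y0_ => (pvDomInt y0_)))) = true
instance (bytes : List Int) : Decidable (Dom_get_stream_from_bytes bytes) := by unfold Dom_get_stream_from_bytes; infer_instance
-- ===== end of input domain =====

-- B restates the task as three staged passes over a flat bit stream (bytes → bit list → 6-bit
-- groups → end-mark on the last byte) instead of A's single loop over triplets (objective: alternative).

-- ===== PORT A =====
def get_stream_from_bytes (bytes : List Int) : List Int :=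
  let num_triplets : Int := PySem.Int.truncdiv (PySem.List.len bytes) 3
  (PySem.List.pyRange 0 num_triplets 1).foldl (fun data i =>
    let x := PySem.List.pyGetD bytes (3 * i + 0) 0
    let y := PySem.List.pyGetD bytes (3 * i + 1) 0
    let z := PySem.List.pyGetD bytes (3 * i + 2) 0
    let message_end : Int := if i = num_triplets - 1 then 1 else 0
    data ++ [PySem.Int.band (x >>> (2 : Nat)) 0x3f,
             PySem.Int.bor ((PySem.Int.band x 0x03) <<< (4 : Nat)) (PySem.Int.band (y >>> (4 : Nat)) 0x0f),
             PySem.Int.bor ((PySem.Int.band y 0x0f) <<< (2 : Nat)) (PySem.Int.band (z >>> (6 : Nat)) 0x03),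
             PySem.Int.bor (PySem.Int.band z 0x3f) (message_end <<< (7 : Nat))]) []

-- ===== PORT B =====
-- Stage 1: expand the usable triplets into one flat MSB-first bit list
-- ('b >> k' with k drawn from range(7, -1, -1); all these k are ≥ 0, so '.toNat' is exact here).
-- Stage 2: regroup the bit stream into 6-bit packed bytes.
-- Stage 3: flag the last packed byte of the stream as the message end.
def get_stream_from_bytes_alt (bytes : List Int) : List Int :=
  let n := PySem.List.len bytes
  let bits := (PySem.List.slice bytes none (some (n - PySem.Int.mod n 3))).foldl
    (fun bits b => bits ++ (PySem.List.pyRange 7 (-1) (-1)).map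
      (fun k => PySem.Int.band (b >>> k.toNat) 1)) []
  let data := (PySem.List.pyRange 0 (PySem.List.len bits) 6).foldl
    (fun data j =>
      data ++ [(PySem.List.slice bits (some j) (some (j + 6))).foldl
        (fun value bit => value * 2 + bit) 0]) []
  if data.isEmpty then data
  else PySem.List.pySetD data (-1) (PySem.Int.bor (PySem.List.pyGetD data (-1) 0) 0x80)

-- ===== PRECONDITION & SPEC =====
def Spec_get_stream_from_bytes (bytes : List Int) (out : List Int) : Prop := out = get_stream_from_bytes_alt bytes
instance (bytes : List Int) (out : List Int) : Decidable (Spec_get_stream_from_bytes bytes out) := by unfold Spec_get_stream_from_bytes; infer_instance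

-- ===== CLAIM (what is proved, stated in full; the proofs are below) =====
def Claim_equal_get_stream_from_bytes : Prop := ∀ (bytes : List Int), Dom_get_stream_from_bytes bytes → Spec_get_stream_from_bytes bytes (get_stream_from_bytes bytes)

-- ===== LEMMAS AND PROOFS =====

-- Python '>>' / '<<' at the literal shift amounts A uses, as division / multiplication.
theorem int_shl2 (a : Int) : a <<< (2 : Nat) = a * 4 := by
  rw [show (a <<< (2 : Nat)) = a <<< (((2 : Nat)) : Int) from (Int.shiftLeft_natCast_right a 2).symm,
     Int.shiftLeft_eq_mul_pow]
  norm_num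

theorem int_shl4 (a : Int) : a <<< (4 : Nat) = a * 16 := by
  rw [show (a <<< (4 : Nat)) = a <<< (((4 : Nat)) : Int) from (Int.shiftLeft_natCast_right a 4).symm,
     Int.shiftLeft_eq_mul_pow]
  norm_num

-- Python 'a & (2^k - 1)' is 'a mod 2^k' (every Int, two's complement), at the masks used.
theorem band_mask3 (a : Int) : PySem.Int.band a 3 = a % 4 := by
  have h4 : ∀ (w : Nat), w &&& 3 = w % 4 := by
    intro w
    have h := Nat.and_two_pow_sub_one_eq_mod w 2
    rw [show (2:Nat) ^ 2 - 1 = 3 from rfl] at h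
    rw [show (2:Nat) ^ 2 = 4 from rfl] at h
    exact h
  unfold PySem.Int.band
  split_ifs with h h2 h3 <;> try omega
  · try rw [show Int.toNat 3 = 3 from rfl]
    rw [h4 a.toNat]; omega
  · try rw [show Int.toNat 3 = 3 from rfl]
    rw [Nat.land_comm, h4 ((-a - 1).toNat)]; omega

theorem band_mask15 (a : Int) : PySem.Int.band a 15 = a % 16 := by
  have h4 : ∀ (w : Nat), w &&& 15 = w % 16 := by
    intro w
    have h := Nat.and_two_pow_sub_one_eq_mod w 4
    rw [show (2:Nat) ^ 4 - 1 = 15 from rfl] at h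
    rw [show (2:Nat) ^ 4 = 16 from rfl] at h
    exact h
  unfold PySem.Int.band
  split_ifs with h h2 h3 <;> try omega
  · try rw [show Int.toNat 15 = 15 from rfl]
    rw [h4 a.toNat]; omega
  · try rw [show Int.toNat 15 = 15 from rfl]
    rw [Nat.land_comm, h4 ((-a - 1).toNat)]; omega

theorem band_mask63 (a : Int) : PySem.Int.band a 63 = a % 64 := by
  have h4 : ∀ (w : Nat), w &&& 63 = w % 64 := by
    intro w
    have h := Nat.and_two_pow_sub_one_eq_mod w 6
    rw [show (2:Nat) ^ 6 - 1 = 63 from rfl] at h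
    rw [show (2:Nat) ^ 6 = 64 from rfl] at h
    exact h
  unfold PySem.Int.band
  split_ifs with h h2 h3 <;> try omega
  · try rw [show Int.toNat 63 = 63 from rfl]
    rw [h4 a.toNat]; omega
  · try rw [show Int.toNat 63 = 63 from rfl]
    rw [Nat.land_comm, h4 ((-a - 1).toNat)]; omega

-- Python 'a | b' is 'a + b' when the set bits are disjoint (2^k divides a, 0 ≤ b < 2^k).
theorem bor_disjoint (k : Nat) (a b : Int) (ha : 0 ≤ a) (hd : ((2 ^ k : Nat) : Int) ∣ a)
    (hb : 0 ≤ b) (hb2 : b < ((2 ^ k : Nat) : Int)) : PySem.Int.bor a b = a + b := by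
  unfold PySem.Int.bor
  split_ifs <;> try omega
  obtain ⟨m, hm⟩ := hd
  have hP : (0:Int) < ((2 ^ k : Nat) : Int) := by positivity
  have hm0 : 0 ≤ m := by
    by_contra hneg
    push Not at hneg
    have : ((2 ^ k : Nat) : Int) * m < 0 := mul_neg_of_pos_of_neg hP hneg
    omega
  have h1 : ((2 ^ k * m.toNat : Nat) : Int) = a := by
    push_cast
    rw [Int.toNat_of_nonneg hm0]
    exact hm.symm
  have h2 : 2 ^ k * m.toNat = a.toNat := by
    have h5 := h1.trans (Int.toNat_of_nonneg ha).symm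
    exact_mod_cast h5
  have hbn : b.toNat < 2 ^ k := by
    have hbt : (b.toNat : Int) = b := Int.toNat_of_nonneg hb
    omega
  rw [← h2, ← Nat.two_pow_add_eq_or_of_lt hbn]
  push_cast
  rw [Int.toNat_of_nonneg hm0, Int.toNat_of_nonneg hb]
  push_cast at hm
  omega

-- Proof-side names: one bit of a byte, the 8 MSB-first bits of a byte, the 6-bit regroup value.
def pvBit (b : Int) (r : Nat) : Int := PySem.Int.band (b >>> r) 1

def pvBits8 (b : Int) : List Int :=
  [pvBit b 7, pvBit b 6, pvBit b 5, pvBit b 4, pvBit b 3, pvBit b 2, pvBit b 1, pvBit b 0]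

def pvVal6 (c : List Int) : Int := c.foldl (fun value bit => value * 2 + bit) 0

-- A's per-triplet emission (emitA), and the same with the message_end bit forced to 0 (emitA0).
def emitA (bytes : List Int) (n i : Int) : List Int :=
  [PySem.Int.band ((PySem.List.pyGetD bytes (3 * i + 0) 0) >>> (2 : Nat)) 0x3f,
   PySem.Int.bor ((PySem.Int.band (PySem.List.pyGetD bytes (3 * i + 0) 0) 0x03) <<< (4 : Nat))
                 (PySem.Int.band ((PySem.List.pyGetD bytes (3 * i + 1) 0) >>> (4 : Nat)) 0x0f),
   PySem.Int.bor ((PySem.Int.band (PySem.List.pyGetD bytes (3 * i + 1) 0) 0x0f) <<< (2 : Nat))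
                 (PySem.Int.band ((PySem.List.pyGetD bytes (3 * i + 2) 0) >>> (6 : Nat)) 0x03),
   PySem.Int.bor (PySem.Int.band (PySem.List.pyGetD bytes (3 * i + 2) 0) 0x3f)
                 ((if i = n - 1 then (1:Int) else 0) <<< (7 : Nat))]

def emitA0 (bytes : List Int) (i : Int) : List Int :=
  [PySem.Int.band ((PySem.List.pyGetD bytes (3 * i + 0) 0) >>> (2 : Nat)) 0x3f,
   PySem.Int.bor ((PySem.Int.band (PySem.List.pyGetD bytes (3 * i + 0) 0) 0x03) <<< (4 : Nat))
                 (PySem.Int.band ((PySem.List.pyGetD bytes (3 * i + 1) 0) >>> (4 : Nat)) 0x0f),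
   PySem.Int.bor ((PySem.Int.band (PySem.List.pyGetD bytes (3 * i + 1) 0) 0x0f) <<< (2 : Nat))
                 (PySem.Int.band ((PySem.List.pyGetD bytes (3 * i + 2) 0) >>> (6 : Nat)) 0x03),
   PySem.Int.band (PySem.List.pyGetD bytes (3 * i + 2) 0) 0x3f]

-- Dropping 8·q bits of a bit stream drops q source bytes.
theorem drop_flatMap_bits8 (q : Nat) (l : List Int) :
    (l.flatMap pvBits8).drop (8 * q) = (l.drop q).flatMap pvBits8 := by
  induction q generalizing l with
  | zero => simp
  | succ q ih =>
    cases l with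
    | nil => simp
    | cons a l' =>
      have h : 8 * (q + 1) = (pvBits8 a).length + 8 * q := by simp [pvBits8]; ring
      simp only [List.flatMap_cons, h, List.drop_length_add_append, List.drop_succ_cons]
      exact ih l'

-- The four 6-bit values regrouped from one triplet's 24 bits are A's four packed bytes
-- (with the message_end bit 0): one lemma per slice.
theorem val6_slice0 (x y z : Int) (t : List Int) :
    pvVal6 ((pvBits8 x ++ (pvBits8 y ++ (pvBits8 z ++ t))).take 6)
      = PySem.Int.band (x >>> (2 : Nat)) 0x3f := by
  have hm : ∀ a : Int, PySem.Int.mod a 2 = a % 2 := fun a => PySem.Int.mod_eq_emod_of_pos (by norm_num)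
  simp only [pvBits8, List.cons_append, List.take, pvVal6, List.foldl, pvBit,
    PySem.Int.band_one, hm, Int.shiftRight_eq_div_pow, band_mask63]
  push_cast
  norm_num
  omega

theorem val6_slice1 (x y z : Int) (t : List Int) :
    pvVal6 (((pvBits8 x ++ (pvBits8 y ++ (pvBits8 z ++ t))).drop 6).take 6)
      = PySem.Int.bor ((PySem.Int.band x 0x03) <<< (4 : Nat)) (PySem.Int.band (y >>> (4 : Nat)) 0x0f) := by
  have hm : ∀ a : Int, PySem.Int.mod a 2 = a % 2 := fun a => PySem.Int.mod_eq_emod_of_pos (by norm_num)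
  rw [bor_disjoint 4 ((PySem.Int.band x 0x03) <<< (4 : Nat))
        (PySem.Int.band (y >>> (4 : Nat)) 0x0f)
        (by rw [int_shl4, band_mask3]; omega)
        (by rw [int_shl4, band_mask3]; exact ⟨x % 4, by push_cast; ring⟩)
        (by rw [Int.shiftRight_eq_div_pow, band_mask15]; norm_num; omega)
        (by rw [Int.shiftRight_eq_div_pow, band_mask15]; norm_num; omega)]
  simp only [pvBits8, List.cons_append, List.drop, List.take, pvVal6, List.foldl, pvBit,
    PySem.Int.band_one, hm, Int.shiftRight_eq_div_pow, int_shl4, band_mask3, band_mask15]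
  push_cast
  norm_num
  omega

theorem val6_slice2 (x y z : Int) (t : List Int) :
    pvVal6 (((pvBits8 x ++ (pvBits8 y ++ (pvBits8 z ++ t))).drop 12).take 6)
      = PySem.Int.bor ((PySem.Int.band y 0x0f) <<< (2 : Nat)) (PySem.Int.band (z >>> (6 : Nat)) 0x03) := by
  have hm : ∀ a : Int, PySem.Int.mod a 2 = a % 2 := fun a => PySem.Int.mod_eq_emod_of_pos (by norm_num)
  rw [bor_disjoint 2 ((PySem.Int.band y 0x0f) <<< (2 : Nat))
        (PySem.Int.band (z >>> (6 : Nat)) 0x03)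
        (by rw [int_shl2, band_mask15]; omega)
        (by rw [int_shl2, band_mask15]; exact ⟨y % 16, by push_cast; ring⟩)
        (by rw [Int.shiftRight_eq_div_pow, band_mask3]; norm_num; omega)
        (by rw [Int.shiftRight_eq_div_pow, band_mask3]; norm_num; omega)]
  simp only [pvBits8, List.cons_append, List.drop, List.take, pvVal6, List.foldl, pvBit,
    PySem.Int.band_one, hm, Int.shiftRight_eq_div_pow, int_shl2, band_mask15, band_mask3]
  push_cast
  norm_num
  omega

theorem val6_slice3 (x y z : Int) (t : List Int) :
    pvVal6 (((pvBits8 x ++ (pvBits8 y ++ (pvBits8 z ++ t))).drop 18).take 6)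
      = PySem.Int.band z 0x3f := by
  have hm : ∀ a : Int, PySem.Int.mod a 2 = a % 2 := fun a => PySem.Int.mod_eq_emod_of_pos (by norm_num)
  simp only [pvBits8, List.cons_append, List.drop, List.take, pvVal6, List.foldl, pvBit,
    PySem.Int.band_one, hm, Int.shiftRight_eq_div_pow, band_mask63]
  push_cast
  norm_num
  omega

-- range (4·(N+1)) splits as range (4·N) and the four new indices.
theorem range_four_succ (N : Nat) :
    List.range (4 * (N + 1)) = List.range (4 * N) ++ [4 * N, 4 * N + 1, 4 * N + 2, 4 * N + 3] := by
  have h : 4 * (N + 1) = (((4 * N) + 1) + 1 + 1) + 1 := by ring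
  rw [h, List.range_succ, List.range_succ, List.range_succ, List.range_succ]
  simp

-- data[-1] |= 0x80, when data ends in a singleton.
theorem pySetD_append_singleton (xs : List Int) (a w : Int) :
    PySem.List.pySetD (xs ++ [a]) (-1) w = xs ++ [w] := by
  simp [PySem.List.pySetD, PySem.List.pySet?, PySem.List.pyIdx?]

-- A bit stream of l source bytes has 8·|l| bits.
theorem length_flatMap_bits8 (l : List Int) : (l.flatMap pvBits8).length = 8 * l.length := by
  induction l with
  | nil => simp
  | cons a l ih => simp only [List.flatMap_cons, List.length_append, ih, pvBits8,
      List.length_cons, List.length_nil]; ring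

-- range (4·N) as N consecutive blocks of four indices.
theorem range_four (N : Nat) :
    List.range (4 * N) = (List.range N).flatMap (fun i => [4 * i, 4 * i + 1, 4 * i + 2, 4 * i + 3]) := by
  induction N with
  | zero => simp
  | succ n ih => rw [range_four_succ, ih, List.range_succ]; simp

-- A's emission off the last triplet is emitA0.
theorem emitA_eq_emitA0 (bytes : List Int) (n i : Int) (h : i ≠ n - 1) :
    emitA bytes n i = emitA0 bytes i := by
  unfold emitA emitA0
  rw [if_neg h, show ((0:Int) <<< (7 : Nat)) = 0 from rfl]
  simp

-- A's emission at the last triplet: emitA0 with 0x80 OR-ed into the fourth byte.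
theorem emitA_last (bytes : List Int) (n : Int) :
    emitA bytes n (n - 1)
      = [PySem.Int.band ((PySem.List.pyGetD bytes (3 * (n - 1) + 0) 0) >>> (2 : Nat)) 0x3f,
         PySem.Int.bor ((PySem.Int.band (PySem.List.pyGetD bytes (3 * (n - 1) + 0) 0) 0x03) <<< (4 : Nat))
                       (PySem.Int.band ((PySem.List.pyGetD bytes (3 * (n - 1) + 1) 0) >>> (4 : Nat)) 0x0f),
         PySem.Int.bor ((PySem.Int.band (PySem.List.pyGetD bytes (3 * (n - 1) + 1) 0) 0x0f) <<< (2 : Nat))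
                       (PySem.Int.band ((PySem.List.pyGetD bytes (3 * (n - 1) + 2) 0) >>> (6 : Nat)) 0x03),
         PySem.Int.bor (PySem.Int.band (PySem.List.pyGetD bytes (3 * (n - 1) + 2) 0) 0x3f) 128] := by
  unfold emitA
  rw [if_pos rfl, show ((1:Int) <<< (7 : Nat)) = 128 from rfl]

-- The four regrouped 6-bit values of triplet i are A's four packed bytes with message_end 0.
theorem chunk_eq (bytes : List Int) (N i : Nat) (hi : i < N) (h3 : 3 * N <= bytes.length) :
    [pvVal6 ((((bytes.take (3 * N)).flatMap pvBits8).drop (6 * (4 * i))).take 6),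
     pvVal6 ((((bytes.take (3 * N)).flatMap pvBits8).drop (6 * (4 * i + 1))).take 6),
     pvVal6 ((((bytes.take (3 * N)).flatMap pvBits8).drop (6 * (4 * i + 2))).take 6),
     pvVal6 ((((bytes.take (3 * N)).flatMap pvBits8).drop (6 * (4 * i + 3))).take 6)]
      = emitA0 bytes (i : Int) := by
  have hl : (bytes.take (3 * N)).length = 3 * N := by
    rw [List.length_take]; omega
  have h0 : 3 * i < (bytes.take (3 * N)).length := by omega
  have hb0 : 3 * i < bytes.length := by omega
  have hb1 : 3 * i + 1 < bytes.length := by omega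
  have hb2 : 3 * i + 2 < bytes.length := by omega
  have hts : (bytes.take (3 * N)).drop (3 * i)
      = bytes[3 * i] :: bytes[3 * i + 1] :: bytes[3 * i + 2] :: (bytes.take (3 * N)).drop (3 * i + 3) := by
    rw [List.drop_eq_getElem_cons h0,
        List.drop_eq_getElem_cons (by omega : 3 * i + 1 < (bytes.take (3 * N)).length),
        List.drop_eq_getElem_cons (by omega : 3 * i + 2 < (bytes.take (3 * N)).length)]
    simp [List.getElem_take]
  have hblock : ((bytes.take (3 * N)).flatMap pvBits8).drop (24 * i)
      = pvBits8 bytes[3 * i] ++ (pvBits8 bytes[3 * i + 1] ++ (pvBits8 bytes[3 * i + 2]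
          ++ ((bytes.take (3 * N)).drop (3 * i + 3)).flatMap pvBits8)) := by
    rw [show 24 * i = 8 * (3 * i) by ring, drop_flatMap_bits8, hts]
    simp [List.flatMap_cons]
  have hd0 : ((bytes.take (3 * N)).flatMap pvBits8).drop (6 * (4 * i))
      = ((bytes.take (3 * N)).flatMap pvBits8).drop (24 * i) := by
    congr 1; ring
  have hd1 : ((bytes.take (3 * N)).flatMap pvBits8).drop (6 * (4 * i + 1))
      = (((bytes.take (3 * N)).flatMap pvBits8).drop (24 * i)).drop 6 := by
    rw [List.drop_drop]; congr 1; ring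
  have hd2 : ((bytes.take (3 * N)).flatMap pvBits8).drop (6 * (4 * i + 2))
      = (((bytes.take (3 * N)).flatMap pvBits8).drop (24 * i)).drop 12 := by
    rw [List.drop_drop]; congr 1; ring
  have hd3 : ((bytes.take (3 * N)).flatMap pvBits8).drop (6 * (4 * i + 3))
      = (((bytes.take (3 * N)).flatMap pvBits8).drop (24 * i)).drop 18 := by
    rw [List.drop_drop]; congr 1; ring
  have hg0 : PySem.List.pyGetD bytes (3 * (i : Int) + 0) 0 = bytes[3 * i] := by
    rw [show 3 * (i : Int) + 0 = ((3 * i : Nat) : Int) by push_cast; ring, PySem.List.pyGetD_natCast,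
        List.getD_eq_getElem _ _ hb0]
  have hg1 : PySem.List.pyGetD bytes (3 * (i : Int) + 1) 0 = bytes[3 * i + 1] := by
    rw [show 3 * (i : Int) + 1 = ((3 * i + 1 : Nat) : Int) by push_cast; ring, PySem.List.pyGetD_natCast,
        List.getD_eq_getElem _ _ hb1]
  have hg2 : PySem.List.pyGetD bytes (3 * (i : Int) + 2) 0 = bytes[3 * i + 2] := by
    rw [show 3 * (i : Int) + 2 = ((3 * i + 2 : Nat) : Int) by push_cast; ring, PySem.List.pyGetD_natCast,
        List.getD_eq_getElem _ _ hb2]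
  rw [hd0, hd1, hd2, hd3, hblock]
  unfold emitA0
  rw [hg0, hg1, hg2, val6_slice0, val6_slice1, val6_slice2, val6_slice3]

theorem core_eq (bytes : List Int) : get_stream_from_bytes bytes = get_stream_from_bytes_alt bytes := by
  have hN3 : 3 * (bytes.length / 3) <= bytes.length := by omega
  have h1 : PySem.Int.truncdiv (PySem.List.len bytes) 3 = ((bytes.length / 3 : Nat) : Int) := by
    simp only [PySem.List.len, PySem.Int.truncdiv,
               Int.tdiv_eq_ediv_of_nonneg (Int.natCast_nonneg bytes.length)]
    omega
  have hA : get_stream_from_bytes bytes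
      = (List.range (bytes.length / 3)).flatMap
          (fun (i : Nat) => emitA bytes ((bytes.length / 3 : Nat) : Int) ((i : Nat) : Int)) := by
    show List.foldl (fun acc i => acc ++ emitA bytes (PySem.Int.truncdiv (PySem.List.len bytes) 3) i) []
        (PySem.List.pyRange 0 (PySem.Int.truncdiv (PySem.List.len bytes) 3) 1) = _
    rw [h1, PySem.List.foldl_append_eq_flatMap, PySem.List.pyRange_one, List.flatMap_map]
    simp only [List.nil_append, Function.comp_def, zero_add, Int.sub_zero, Int.toNat_natCast]
  have hts : PySem.List.slice bytes none (some (PySem.List.len bytes - PySem.Int.mod (PySem.List.len bytes) 3))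
      = bytes.take (3 * (bytes.length / 3)) := by
    rw [show PySem.List.len bytes - PySem.Int.mod (PySem.List.len bytes) 3
          = ((3 * (bytes.length / 3) : Nat) : Int) by
        rw [PySem.List.len_eq, PySem.Int.mod_eq_emod_of_pos (by norm_num)]; push_cast; omega]
    exact PySem.List.slice_to_natCast bytes _
  have hbits : (PySem.List.slice bytes none (some (PySem.List.len bytes - PySem.Int.mod (PySem.List.len bytes) 3))).foldl
      (fun bits b => bits ++ (PySem.List.pyRange 7 (-1) (-1)).map
        (fun k => PySem.Int.band (b >>> k.toNat) 1)) []
      = (bytes.take (3 * (bytes.length / 3))).flatMap pvBits8 := by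
    rw [hts, PySem.List.foldl_append_eq_flatMap]
    simp only [List.nil_append]
    congr 1
  have hlen : ((bytes.take (3 * (bytes.length / 3))).flatMap pvBits8).length
      = 24 * (bytes.length / 3) := by
    rw [length_flatMap_bits8, List.length_take]; omega
  have hrange : PySem.List.pyRange 0 (((24 * (bytes.length / 3) : Nat) : Int)) 6
      = (List.range (4 * (bytes.length / 3))).map (fun k => ((6 * k : Nat) : Int)) := by
    rw [PySem.List.pyRange_of_pos _ _ (by norm_num)]
    congr 1
    · funext k; push_cast; ring
    · congr 1
      rcases Nat.eq_zero_or_pos (bytes.length / 3) with h | h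
      · rw [h]; norm_num
      · rw [if_pos (by push_cast; omega)]
        rw [show ((24 * (bytes.length / 3) : Nat) : Int) - 0 + 6 - 1
              = ((24 * (bytes.length / 3) + 5 : Nat) : Int) by push_cast; ring]
        omega
  set N := bytes.length / 3 with hNdef
  set bits := (bytes.take (3 * N)).flatMap pvBits8 with hbitsdef
  have hdata : (PySem.List.pyRange 0 (PySem.List.len bits) 6).foldl
      (fun data j => data ++ [(PySem.List.slice bits (some j) (some (j + 6))).foldl
        (fun value bit => value * 2 + bit) 0]) []
      = (List.range N).flatMap (fun (i : Nat) => emitA0 bytes ((i : Nat) : Int)) := by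
    rw [PySem.List.len_eq, show ((bits.length : Nat) : Int) = ((24 * N : Nat) : Int) by rw [hlen],
        hrange, PySem.List.foldl_append_singleton_eq_map]
    simp only [List.nil_append, List.map_map]
    have hmap : ∀ k ∈ List.range (4 * N),
        ((fun j => List.foldl (fun value bit => value * 2 + bit) 0
            (PySem.List.slice bits (some j) (some (j + 6)))) ∘ (fun k : Nat => ((6 * k : Nat) : Int))) k
          = pvVal6 ((bits.drop (6 * k)).take 6) := by
      intro k _
      show (PySem.List.slice bits (some ((6 * k : Nat) : Int)) (some (((6 * k : Nat) : Int) + 6))).foldl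
        (fun value bit => value * 2 + bit) 0 = _
      rw [show ((6 * k : Nat) : Int) + 6 = ((6 * k + 6 : Nat) : Int) by push_cast; ring,
          PySem.List.slice_natCast, show 6 * k + 6 - 6 * k = 6 by omega]
      rfl
    rw [List.map_congr_left hmap, range_four, List.map_flatMap]
    refine List.flatMap_congr ?_
    intro i hi
    have hiN : i < N := List.mem_range.mp hi
    simp only [List.map]
    exact chunk_eq bytes N i hiN hN3
  rw [hA]
  show _ = get_stream_from_bytes_alt bytes
  rw [get_stream_from_bytes_alt]
  simp only [hbits, hdata]
  rcases Nat.eq_zero_or_pos N with hz | hpos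
  · rw [hz]
    simp
  · have hsplit : List.range N = List.range (N - 1) ++ [N - 1] := by
      rw [← List.range_succ]
      congr 1
      omega
    rw [hsplit, List.flatMap_append, List.flatMap_append]
    have hpre : (List.range (N - 1)).flatMap (fun (i : Nat) => emitA bytes ((N : Nat) : Int) ((i : Nat) : Int))
        = (List.range (N - 1)).flatMap (fun (i : Nat) => emitA0 bytes ((i : Nat) : Int)) := by
      refine List.flatMap_congr ?_
      intro i hi
      have : i < N - 1 := List.mem_range.mp hi
      exact emitA_eq_emitA0 bytes _ _ (by push_cast; omega)
    rw [hpre]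
    have hcast : ((N - 1 : Nat) : Int) = ((N : Nat) : Int) - 1 := by push_cast; omega
    have hlastA : ([N - 1] : List Nat).flatMap (fun (i : Nat) => emitA bytes ((N : Nat) : Int) ((i : Nat) : Int))
        = emitA bytes ((N : Nat) : Int) (((N : Nat) : Int) - 1) := by
      simp [hcast]
    have hlastB : ([N - 1] : List Nat).flatMap (fun (i : Nat) => emitA0 bytes ((i : Nat) : Int))
        = emitA0 bytes (((N : Nat) : Int) - 1) := by
      simp [hcast]
    rw [hlastA, hlastB, emitA_last]
    set P := (List.range (N - 1)).flatMap (fun (i : Nat) => emitA0 bytes ((i : Nat) : Int)) with hP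
    set m : Int := ((N : Nat) : Int) - 1 with hm
    unfold emitA0
    set a0 := PySem.Int.band ((PySem.List.pyGetD bytes (3 * m + 0) 0) >>> (2 : Nat)) 0x3f with ha0
    set a1 := PySem.Int.bor ((PySem.Int.band (PySem.List.pyGetD bytes (3 * m + 0) 0) 0x03) <<< (4 : Nat))
                 (PySem.Int.band ((PySem.List.pyGetD bytes (3 * m + 1) 0) >>> (4 : Nat)) 0x0f) with ha1
    set a2 := PySem.Int.bor ((PySem.Int.band (PySem.List.pyGetD bytes (3 * m + 1) 0) 0x0f) <<< (2 : Nat))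
                 (PySem.Int.band ((PySem.List.pyGetD bytes (3 * m + 2) 0) >>> (6 : Nat)) 0x03) with ha2
    set a3 := PySem.Int.band (PySem.List.pyGetD bytes (3 * m + 2) 0) 0x3f with ha3
    have hassoc : P ++ [a0, a1, a2, a3] = (P ++ [a0, a1, a2]) ++ [a3] := by
      simp
    rw [hassoc, if_neg (by simp)]
    rw [PySem.List.pyGetD_neg_one_append_singleton, pySetD_append_singleton]
    simp [List.append_assoc]

-- ===== VERDICT (by name: the statement is the Claim_ definition above) =====
theorem get_stream_from_bytes_spec : Claim_equal_get_stream_from_bytes := by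
  intro bytes _
  unfold Spec_get_stream_from_bytes
  exact core_eq bytes
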